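-- pv_equiv track=rewrite | github.com/Thomas-mcinally/advent-of-code | 2024/day20/part2.py | count_good_cheats_starting_from
-- ===== SOURCE A (Python) =====
-- import collections
--
-- def count_good_cheats_starting_from(grid, coords_to_shortest_path, start_r,start_c):
--     ROWS, COLS = len(grid), len(grid[0])
--     cheat_end_positions = collections.defaultdict(lambda: float("inf")) #required cheat duration is min val needed for this (end_r, end_c)
--     for delta_c in range(20 + 1):
--         for delta_r in range((20)-delta_c + 1):
--             cheat_end_positions[(start_r+delta_r, start_c+delta_c)] = min(delta_c+delta_r, cheat_end_positions[(start_r+delta_r, start_c+delta_c)])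
--             cheat_end_positions[(start_r+delta_r, start_c-delta_c)] = min(delta_c+delta_r, cheat_end_positions[(start_r+delta_r, start_c-delta_c)])
--             cheat_end_positions[(start_r-delta_r, start_c+delta_c)] = min(delta_c+delta_r, cheat_end_positions[(start_r-delta_r, start_c+delta_c)])
--             cheat_end_positions[(start_r-delta_r, start_c-delta_c)] = min(delta_c+delta_r, cheat_end_positions[(start_r-delta_r, start_c-delta_c)])
--     good_cheats = 0
--     for [end_r, end_c], cheat_duration in cheat_end_positions.items():
--         if end_r < 0 or end_c < 0 or end_r >= ROWS or end_c >= COLS or grid[end_r][end_c] == "#":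
--             continue
--         savings = coords_to_shortest_path[(end_r, end_c)] - coords_to_shortest_path[(start_r, start_c)]-cheat_duration
--         if savings >= 100:
--             good_cheats += 1
--
--     return good_cheats
-- ===== SOURCE B (Python) =====
-- def count_good_cheats_starting_from(grid, coords_to_shortest_path, start_r, start_c):
--     ROWS, COLS = len(grid), len(grid[0])
--     good_cheats = 0
--     for dr in range(-20, 21):
--         rem = 20 - abs(dr)
--         for dc in range(-rem, rem + 1):
--             end_r, end_c = start_r + dr, start_c + dc
--             if end_r < 0 or end_c < 0 or end_r >= ROWS or end_c >= COLS or grid[end_r][end_c] == "#":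
--                 continue
--             savings = coords_to_shortest_path[(end_r, end_c)] - coords_to_shortest_path[(start_r, start_c)] - (abs(dr) + abs(dc))
--             if savings >= 100:
--                 good_cheats += 1
--     return good_cheats
-- ===== Notes on version B (the rewrite author's own statement) =====
-- stated objective: simpler
-- what changed: Drops the defaultdict of minimal cheat durations entirely: instead of building a 441-key dict via four symmetric min-updates and then scanning its items, B walks the Manhattan-radius-20 diamond directly with one nested (dr, dc) loop, visiting each endpoint exactly once with its canonical duration |dr|+|dc|.
import Mathlib
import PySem

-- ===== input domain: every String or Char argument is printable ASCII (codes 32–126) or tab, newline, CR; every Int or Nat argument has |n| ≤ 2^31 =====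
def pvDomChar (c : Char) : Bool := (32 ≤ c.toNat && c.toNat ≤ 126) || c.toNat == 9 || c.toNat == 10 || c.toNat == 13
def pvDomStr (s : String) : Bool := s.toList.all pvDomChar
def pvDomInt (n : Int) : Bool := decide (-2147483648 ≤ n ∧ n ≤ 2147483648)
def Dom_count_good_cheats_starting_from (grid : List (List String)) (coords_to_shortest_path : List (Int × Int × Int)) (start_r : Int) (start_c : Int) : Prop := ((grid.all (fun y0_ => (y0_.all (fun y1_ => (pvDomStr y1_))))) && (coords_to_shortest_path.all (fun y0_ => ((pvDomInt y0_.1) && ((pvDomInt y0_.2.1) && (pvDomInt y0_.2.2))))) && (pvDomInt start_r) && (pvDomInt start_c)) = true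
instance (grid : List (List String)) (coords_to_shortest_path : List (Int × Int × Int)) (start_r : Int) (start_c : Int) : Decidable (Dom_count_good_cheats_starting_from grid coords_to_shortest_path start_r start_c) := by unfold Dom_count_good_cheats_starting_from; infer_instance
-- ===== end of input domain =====

-- B fuses A's dict-of-minimal-cheat-durations build and its item scan into one direct walk of the
-- Manhattan-radius-20 diamond (each endpoint visited once, duration |dr|+|dc|): no intermediate dict.

-- ===== PORT A =====
-- coords_to_shortest_path[(r, c)]: association-list first-match lookup; the default 0 is never
-- reached under Pre_ (which demands the key be present wherever A looks one up).
def pvLookup (m : List (Int × Int × Int)) (r c : Int) : Int :=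
  ((m.find? (fun p => p.1 == r && p.2.1 == c)).map (fun p => p.2.2)).getD 0

-- cheat_end_positions[k] = min(v, cheat_end_positions[k]) on a defaultdict(lambda: inf):
-- min(v, inf) = v on first touch, min with the stored int afterwards — exact.
def pvUpd (d : PySem.Dict (Int × Int) Int) (k : Int × Int) (v : Int) : PySem.Dict (Int × Int) Int :=
  PySem.Dict.insert d k (match PySem.Dict.get? d k with | some w => min v w | none => v)

def count_good_cheats_starting_from (grid : List (List String)) (coords_to_shortest_path : List (Int × Int × Int)) (start_r : Int) (start_c : Int) : Int :=
  -- ROWS = len(grid), COLS = len(grid[0]) (Pre_ excludes grid = [], where Python raises IndexError)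
  ((PySem.List.pyRange 0 21 1).foldl (fun d dc =>
    (PySem.List.pyRange 0 (21 - dc) 1).foldl (fun d dr =>
      pvUpd (pvUpd (pvUpd (pvUpd d (start_r + dr, start_c + dc) (dc + dr))
        (start_r + dr, start_c - dc) (dc + dr))
        (start_r - dr, start_c + dc) (dc + dr))
        (start_r - dr, start_c - dc) (dc + dr)) d) PySem.Dict.empty).items.foldl
    (fun acc p =>
      if p.1.1 < 0 ∨ p.1.2 < 0 ∨ (grid.length : Int) ≤ p.1.1 ∨ ((PySem.List.pyGetD grid 0 []).length : Int) ≤ p.1.2 then acc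
      else if PySem.List.pyGetD (PySem.List.pyGetD grid p.1.1 []) p.1.2 "" == "#" then acc
      else if 100 ≤ pvLookup coords_to_shortest_path p.1.1 p.1.2 - pvLookup coords_to_shortest_path start_r start_c - p.2 then acc + 1
      else acc) 0

-- ===== PORT B =====
def count_good_cheats_starting_from_alt (grid : List (List String)) (coords_to_shortest_path : List (Int × Int × Int)) (start_r : Int) (start_c : Int) : Int :=
  (PySem.List.pyRange (-20) 21 1).foldl (fun acc dr =>
    (PySem.List.pyRange (-(20 - |dr|)) (20 - |dr| + 1) 1).foldl (fun acc dc =>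
      if start_r + dr < 0 ∨ start_c + dc < 0 ∨ (grid.length : Int) ≤ start_r + dr ∨ ((PySem.List.pyGetD grid 0 []).length : Int) ≤ start_c + dc then acc
      else if PySem.List.pyGetD (PySem.List.pyGetD grid (start_r + dr) []) (start_c + dc) "" == "#" then acc
      else if 100 ≤ pvLookup coords_to_shortest_path (start_r + dr) (start_c + dc) - pvLookup coords_to_shortest_path start_r start_c - (|dr| + |dc|) then acc + 1
      else acc) acc) 0

-- ===== PRECONDITION & SPEC =====
-- Pre_ = exactly the inputs on which the Python A returns normally: grid non-empty (A reads grid[0]),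
-- and for every diamond endpoint passing A's bound guard the indexed row is long enough (IndexError
-- otherwise on a ragged grid) and, when the cell is not '#', both dict keys A reads exist (KeyError otherwise).
def Pre_count_good_cheats_starting_from (grid : List (List String)) (coords_to_shortest_path : List (Int × Int × Int)) (start_r : Int) (start_c : Int) : Prop :=
  grid ≠ [] ∧
  ∀ dr ∈ List.range 41, ∀ dc ∈ List.range 41,
    ((dr : Int) - 20).natAbs + ((dc : Int) - 20).natAbs ≤ 20 →
    (0 ≤ start_r + ((dr : Int) - 20) ∧ 0 ≤ start_c + ((dc : Int) - 20) ∧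
      start_r + ((dr : Int) - 20) < (grid.length : Int) ∧
      start_c + ((dc : Int) - 20) < ((grid.headD []).length : Int)) →
    (start_c + ((dc : Int) - 20) < (((grid[(start_r + ((dr : Int) - 20)).toNat]?).getD []).length : Int) ∧
      ((((grid[(start_r + ((dr : Int) - 20)).toNat]?).getD [])[(start_c + ((dc : Int) - 20)).toNat]?).getD "" ≠ "#" →
        (coords_to_shortest_path.find? (fun p => p.1 == start_r + ((dr : Int) - 20) && p.2.1 == start_c + ((dc : Int) - 20))).isSome = true ∧
        (coords_to_shortest_path.find? (fun p => p.1 == start_r && p.2.1 == start_c)).isSome = true))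
instance (grid : List (List String)) (coords_to_shortest_path : List (Int × Int × Int)) (start_r : Int) (start_c : Int) : Decidable (Pre_count_good_cheats_starting_from grid coords_to_shortest_path start_r start_c) := by unfold Pre_count_good_cheats_starting_from; infer_instance

def pvWitness_count_good_cheats_starting_from : List (List String) × (List (Int × Int × Int)) × Int × Int :=
  ([["."]], [(0, 0, 0)], 0, 0)

def Spec_count_good_cheats_starting_from (grid : List (List String)) (coords_to_shortest_path : List (Int × Int × Int)) (start_r : Int) (start_c : Int) (out : Int) : Prop := out = count_good_cheats_starting_from_alt grid coords_to_shortest_path start_r start_c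
instance (grid : List (List String)) (coords_to_shortest_path : List (Int × Int × Int)) (start_r : Int) (start_c : Int) (out : Int) : Decidable (Spec_count_good_cheats_starting_from grid coords_to_shortest_path start_r start_c out) := by unfold Spec_count_good_cheats_starting_from; infer_instance

-- ===== CLAIM (what is proved, stated in full; the proofs are below) =====
def Claim_equal_count_good_cheats_starting_from : Prop := ∀ (grid : List (List String)) (coords_to_shortest_path : List (Int × Int × Int)) (start_r : Int) (start_c : Int), Dom_count_good_cheats_starting_from grid coords_to_shortest_path start_r start_c → Pre_count_good_cheats_starting_from grid coords_to_shortest_path start_r start_c → Spec_count_good_cheats_starting_from grid coords_to_shortest_path start_r start_c (count_good_cheats_starting_from grid coords_to_shortest_path start_r start_c)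

-- ===== LEMMAS AND PROOFS =====

-- canonical cheat duration of endpoint k from start (sr, sc)
def pvV (sr sc : Int) (k : Int × Int) : Int := |k.1 - sr| + |k.2 - sc|

-- the shared shape of both loop bodies, as a predicate on (endpoint, duration)
def pvPred (grid : List (List String)) (m : List (Int × Int × Int)) (sr sc : Int) (p : (Int × Int) × Int) : Bool :=
  if p.1.1 < 0 ∨ p.1.2 < 0 ∨ (grid.length : Int) ≤ p.1.1 ∨ ((PySem.List.pyGetD grid 0 []).length : Int) ≤ p.1.2 then false
  else if PySem.List.pyGetD (PySem.List.pyGetD grid p.1.1 []) p.1.2 "" == "#" then false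
  else decide (100 ≤ pvLookup m p.1.1 p.1.2 - pvLookup m sr sc - p.2)

-- A's update stream, relative to (start_r, start_c)
def pvOps : List ((Int × Int) × Int) :=
  (PySem.List.pyRange 0 21 1).flatMap (fun dc =>
    (PySem.List.pyRange 0 (21 - dc) 1).flatMap (fun dr =>
      [((dr, dc), dc + dr), ((dr, -dc), dc + dr), ((-dr, dc), dc + dr), ((-dr, -dc), dc + dr)]))

-- the endpoints B visits, in B's order
def pvAbsKeys (sr sc : Int) : List (Int × Int) :=
  (PySem.List.pyRange (-20) 21 1).flatMap (fun dr =>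
    (PySem.List.pyRange (-(20 - |dr|)) (20 - |dr| + 1) 1).map (fun dc => (sr + dr, sc + dc)))

lemma pvSet_update_nil (l : List (Int × Int)) : PySem.Set.update [] l = PySem.Set.ofList l := by
  rw [PySem.Set.ofList_eq_foldl]; rfl

lemma pvOps_val (sr sc : Int) : ∀ q ∈ pvOps, q.2 = pvV sr sc (sr + q.1.1, sc + q.1.2) := by
  intro q hq
  simp only [pvOps, List.mem_flatMap, PySem.List.mem_pyRange_one, List.mem_cons,
    List.not_mem_nil, or_false] at hq
  obtain ⟨dc, hdc, dr, hdr, hq⟩ := hq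
  rcases hq with rfl | rfl | rfl | rfl <;>
    simp only [pvV, add_sub_cancel_left, abs_neg] <;>
    rw [abs_of_nonneg (by omega), abs_of_nonneg (by omega)] <;> ring

lemma pvMemOps (sr sc : Int) (k : Int × Int) :
    k ∈ pvOps.map (fun q => (sr + q.1.1, sc + q.1.2)) ↔
      (k.1 - sr).natAbs + (k.2 - sc).natAbs ≤ 20 := by
  obtain ⟨k1, k2⟩ := k
  simp only [pvOps, List.map_flatMap, List.mem_flatMap, List.mem_map,
    PySem.List.mem_pyRange_one, List.mem_cons, List.not_mem_nil, or_false]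
  constructor
  · rintro ⟨dc, hdc, dr, hdr, q, hq, hshift⟩
    rcases hq with rfl | rfl | rfl | rfl <;> simp only [Prod.mk.injEq] at hshift <;> omega
  · intro h
    rcases (by omega : sr ≤ k1 ∨ k1 < sr) with h1 | h1 <;>
      rcases (by omega : sc ≤ k2 ∨ k2 < sc) with h2 | h2
    · exact ⟨k2 - sc, by omega, k1 - sr, by omega, ((k1 - sr, k2 - sc), (k2 - sc) + (k1 - sr)),
        Or.inl rfl, by simp only [Prod.mk.injEq]; omega⟩
    · exact ⟨sc - k2, by omega, k1 - sr, by omega, ((k1 - sr, -(sc - k2)), (sc - k2) + (k1 - sr)),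
        Or.inr (Or.inl rfl), by simp only [Prod.mk.injEq]; omega⟩
    · exact ⟨k2 - sc, by omega, sr - k1, by omega, ((-(sr - k1), k2 - sc), (k2 - sc) + (sr - k1)),
        Or.inr (Or.inr (Or.inl rfl)), by simp only [Prod.mk.injEq]; omega⟩
    · exact ⟨sc - k2, by omega, sr - k1, by omega, ((-(sr - k1), -(sc - k2)), (sc - k2) + (sr - k1)),
        Or.inr (Or.inr (Or.inr rfl)), by simp only [Prod.mk.injEq]; omega⟩

lemma pvMemAbsKeys (sr sc : Int) (k : Int × Int) :
    k ∈ pvAbsKeys sr sc ↔ (k.1 - sr).natAbs + (k.2 - sc).natAbs ≤ 20 := by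
  obtain ⟨k1, k2⟩ := k
  simp only [pvAbsKeys, List.mem_flatMap, List.mem_map, PySem.List.mem_pyRange_one]
  constructor
  · rintro ⟨dr, hdr, dc, hdc, hk⟩
    simp only [Prod.mk.injEq] at hk
    rw [Int.abs_eq_natAbs] at hdc
    omega
  · intro h
    refine ⟨k1 - sr, by omega, k2 - sc, ?_, by simp only [Prod.mk.injEq]; omega⟩
    rw [Int.abs_eq_natAbs]
    omega

lemma pvNodupAbsKeys (sr sc : Int) : (pvAbsKeys sr sc).Nodup := by
  rw [pvAbsKeys, List.nodup_flatMap]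
  constructor
  · intro dr _
    refine List.Nodup.map ?_ (PySem.List.nodup_pyRange_one _ _)
    intro a b hab
    simp only [Prod.mk.injEq] at hab
    omega
  · refine (PySem.List.pairwise_lt_pyRange_one (-20) 21).imp ?_
    intro a b hab x hx hx'
    simp only [List.mem_map] at hx hx'
    obtain ⟨dc, _, rfl⟩ := hx
    obtain ⟨dc', _, h⟩ := hx'
    simp only [Prod.mk.injEq] at h
    omega

-- the minimal-duration fold stores exactly the canonical duration at every key it ever touches
lemma pvFold_get? (sr sc : Int) (ops : List ((Int × Int) × Int))
    (hV : ∀ q ∈ ops, q.2 = pvV sr sc (sr + q.1.1, sc + q.1.2))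
    (d : PySem.Dict (Int × Int) Int)
    (hd : ∀ k, d.get? k = none ∨ d.get? k = some (pvV sr sc k))
    (k : Int × Int) :
    (ops.foldl (fun d q => pvUpd d (sr + q.1.1, sc + q.1.2) q.2) d).get? k = none ∨
      (ops.foldl (fun d q => pvUpd d (sr + q.1.1, sc + q.1.2) q.2) d).get? k = some (pvV sr sc k) := by
  induction ops generalizing d with
  | nil => exact hd k
  | cons q rest ih =>
      simp only [List.foldl_cons]
      apply ih (fun q' hq' => hV q' (List.mem_cons_of_mem _ hq'))
      intro k'
      have hq2 := hV q (List.mem_cons_self ..)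
      simp only [pvUpd]
      rw [PySem.Dict.get?_insert]
      by_cases hk : k' = (sr + q.1.1, sc + q.1.2)
      · subst hk
        rcases hd (sr + q.1.1, sc + q.1.2) with h | h <;> rw [if_pos rfl, h] <;> right
        · rw [hq2]
        · simp [hq2]
      · rw [if_neg hk]; exact hd k'

lemma pvKeysA (sr sc : Int) :
    (pvOps.foldl (fun d q => pvUpd d (sr + q.1.1, sc + q.1.2) q.2) PySem.Dict.empty).keys
      = PySem.Set.ofList (pvOps.map (fun q => (sr + q.1.1, sc + q.1.2))) := by
  simp only [pvUpd]
  rw [← pvSet_update_nil]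
  exact PySem.Dict.keys_foldl_insert_key pvOps (fun q => (sr + q.1.1, sc + q.1.2)) _ PySem.Dict.empty

lemma pvNodupKeysA (sr sc : Int) :
    (pvOps.foldl (fun d q => pvUpd d (sr + q.1.1, sc + q.1.2) q.2) PySem.Dict.empty).keys.Nodup := by
  simp only [pvUpd]
  exact PySem.Dict.nodup_keys_foldl_insert_key pvOps (fun q => (sr + q.1.1, sc + q.1.2)) _
    PySem.Dict.empty List.nodup_nil

lemma pvItemsA (sr sc : Int) :
    (pvOps.foldl (fun d q => pvUpd d (sr + q.1.1, sc + q.1.2) q.2) PySem.Dict.empty).items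
      = (PySem.Set.ofList (pvOps.map (fun q => (sr + q.1.1, sc + q.1.2)))).map
          (fun k => (k, pvV sr sc k)) := by
  rw [PySem.Dict.items_eq_map_keys _ (pvNodupKeysA sr sc) 0, pvKeysA]
  apply List.map_congr_left
  intro k hk
  have hmem : k ∈ (pvOps.foldl (fun d q => pvUpd d (sr + q.1.1, sc + q.1.2) q.2) PySem.Dict.empty).keys := by
    rw [pvKeysA]; exact hk
  have hcont := (PySem.Dict.contains_iff_mem_keys _ k).mpr hmem
  rw [PySem.Dict.contains_eq_isSome_get?] at hcont
  rcases pvFold_get? sr sc pvOps (pvOps_val sr sc) PySem.Dict.empty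
      (fun k' => Or.inl (by simp [pysem])) k with h | h
  · rw [h] at hcont; simp at hcont
  · rw [PySem.Dict.getD_of_get?_eq_some _ _ h]

-- A's dict build, flattened to a single fold over pvOps
set_option maxRecDepth 10000 in
lemma pvFlatten (sr sc : Int) :
    ((PySem.List.pyRange 0 21 1).foldl (fun d dc =>
      (PySem.List.pyRange 0 (21 - dc) 1).foldl (fun d dr =>
        pvUpd (pvUpd (pvUpd (pvUpd d (sr + dr, sc + dc) (dc + dr))
          (sr + dr, sc - dc) (dc + dr))
          (sr - dr, sc + dc) (dc + dr))
          (sr - dr, sc - dc) (dc + dr)) d) PySem.Dict.empty)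
      = pvOps.foldl (fun d q => pvUpd d (sr + q.1.1, sc + q.1.2) q.2) PySem.Dict.empty := by
  simp only [pvOps, List.foldl_flatMap, List.foldl_cons, List.foldl_nil, sub_eq_add_neg]

lemma pvBodyA (grid : List (List String)) (m : List (Int × Int × Int)) (sr sc : Int) :
    (fun (acc : Int) (p : (Int × Int) × Int) =>
      if p.1.1 < 0 ∨ p.1.2 < 0 ∨ (grid.length : Int) ≤ p.1.1 ∨ ((PySem.List.pyGetD grid 0 []).length : Int) ≤ p.1.2 then acc
      else if PySem.List.pyGetD (PySem.List.pyGetD grid p.1.1 []) p.1.2 "" == "#" then acc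
      else if 100 ≤ pvLookup m p.1.1 p.1.2 - pvLookup m sr sc - p.2 then acc + 1
      else acc)
      = (fun acc p => if pvPred grid m sr sc p then acc + 1 else acc) := by
  funext acc p
  simp only [pvPred]
  split_ifs <;> (try simp_all) <;> omega

lemma pvBodyB (grid : List (List String)) (m : List (Int × Int × Int)) (sr sc dr acc dc : Int) :
    (if sr + dr < 0 ∨ sc + dc < 0 ∨ (grid.length : Int) ≤ sr + dr ∨ ((PySem.List.pyGetD grid 0 []).length : Int) ≤ sc + dc then acc
      else if PySem.List.pyGetD (PySem.List.pyGetD grid (sr + dr) []) (sc + dc) "" == "#" then acc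
      else if 100 ≤ pvLookup m (sr + dr) (sc + dc) - pvLookup m sr sc - (|dr| + |dc|) then acc + 1
      else acc)
      = (if pvPred grid m sr sc ((sr + dr, sc + dc), pvV sr sc (sr + dr, sc + dc)) then acc + 1 else acc) := by
  simp only [pvPred, pvV, add_sub_cancel_left]
  split_ifs <;> (try simp_all) <;> omega

set_option maxRecDepth 100000 in
set_option maxHeartbeats 2000000 in
theorem count_good_cheats_starting_from_spec : Claim_equal_count_good_cheats_starting_from := by
  intro grid m sr sc _ _
  unfold Spec_count_good_cheats_starting_from
  have eA : count_good_cheats_starting_from grid m sr sc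
      = 0 + ((PySem.Set.ofList (pvOps.map (fun q => (sr + q.1.1, sc + q.1.2)))).countP
          (pvPred grid m sr sc ∘ fun k => (k, pvV sr sc k)) : Int) := by
    unfold count_good_cheats_starting_from
    rw [pvFlatten, pvItemsA, pvBodyA, PySem.List.foldl_if_add_one, List.countP_map]
  -- B's double loop counts pvPred over pvAbsKeys
  have eB : count_good_cheats_starting_from_alt grid m sr sc
      = 0 + ((pvAbsKeys sr sc).countP
          (fun k => pvPred grid m sr sc (k, pvV sr sc k)) : Int) := by
    unfold count_good_cheats_starting_from_alt
    rw [← PySem.List.foldl_if_add_one (fun k => pvPred grid m sr sc (k, pvV sr sc k)) (pvAbsKeys sr sc) 0]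
    simp only [pvAbsKeys, List.foldl_flatMap, List.foldl_map]
    apply PySem.List.foldl_congr_mem
    intro acc dr _
    apply PySem.List.foldl_congr_mem
    intro acc' dc _
    exact pvBodyB grid m sr sc dr acc' dc
  rw [eA, eB]
  have hperm : (PySem.Set.ofList (pvOps.map (fun q => (sr + q.1.1, sc + q.1.2)))).Perm (pvAbsKeys sr sc) := by
    rw [List.perm_ext_iff_of_nodup (PySem.Set.nodup_ofList _) (pvNodupAbsKeys sr sc)]
    intro k
    rw [PySem.Set.mem_ofList, pvMemOps, pvMemAbsKeys]
  have h1 : (PySem.Set.ofList (pvOps.map (fun q => (sr + q.1.1, sc + q.1.2)))).countP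
        (pvPred grid m sr sc ∘ fun k => (k, pvV sr sc k))
      = (PySem.Set.ofList (pvOps.map (fun q => (sr + q.1.1, sc + q.1.2)))).countP
        (fun k => pvPred grid m sr sc (k, pvV sr sc k)) :=
    List.countP_congr (fun a _ => Iff.rfl)
  rw [h1, hperm.countP_eq (fun k => pvPred grid m sr sc (k, pvV sr sc k))]
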